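-- pv_equiv track=rewrite | github.com/EduardoAVicente/TCC | src/controller/scrapper.py | maior_prefixo_comum
-- ===== SOURCE A (Python) =====
-- from collections import defaultdict
--
-- def maior_prefixo_comum(lista_strings):
--     prefixos = defaultdict(int)  # Dicionário para contar a frequência dos prefixos
--
--     # Para cada string, vamos tentar todos os seus prefixos
--     for string in lista_strings:
--         for i in range(1, len(string) + 1):
--             prefixo = string[:i]
--             prefixos[prefixo] += 1
--
--     # Encontrar o prefixo que mais aparece
--     if prefixos:
--         prefixo_comum = max(prefixos, key=prefixos.get)
--     else:
--         return None
--     # Filtrar as strings que começam com o prefixo mais comum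
--     resultado = [s for s in lista_strings if s.startswith(prefixo_comum)]
--
--     return resultado
-- ===== SOURCE B (Python) =====
-- def maior_prefixo_comum(lista_strings):
--     # The count of any prefix never exceeds the count of its one-character
--     # prefix, and that one-character prefix enters A's dict no later, so A's
--     # argmax (first-inserted among maximal counts) is always a single-character
--     # prefix: counting first characters alone gives the same winner.
--     contagem = {}
--     for s in lista_strings:
--         if s:
--             c = s[:1]
--             contagem[c] = contagem.get(c, 0) + 1
--     if not contagem:
--         return None
--     letra = max(contagem, key=contagem.get)
--     return [s for s in lista_strings if s.startswith(letra)]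
-- ===== Notes on version B (the rewrite author's own statement) =====
-- stated objective: faster
-- what changed: Instead of counting every prefix of every string (quadratic in string length) and taking the dict argmax, B counts only first characters in one pass, using the fact that the maximal count is always attained first by a single-character prefix with the same insertion-order tie-break.
import Mathlib
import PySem

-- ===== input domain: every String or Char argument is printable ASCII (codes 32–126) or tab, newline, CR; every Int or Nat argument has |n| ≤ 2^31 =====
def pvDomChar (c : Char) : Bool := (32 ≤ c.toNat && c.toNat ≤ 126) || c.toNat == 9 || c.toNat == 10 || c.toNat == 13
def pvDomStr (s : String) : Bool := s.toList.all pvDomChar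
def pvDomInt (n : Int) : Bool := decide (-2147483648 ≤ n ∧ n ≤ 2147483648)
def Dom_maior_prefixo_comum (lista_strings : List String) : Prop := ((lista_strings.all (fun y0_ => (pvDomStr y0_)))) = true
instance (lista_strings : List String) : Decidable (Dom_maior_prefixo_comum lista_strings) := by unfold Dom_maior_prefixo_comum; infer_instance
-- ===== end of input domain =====

-- B counts only first characters instead of every prefix of every string: the maximal
-- prefix count is always attained first by a one-character prefix, so the argmax and
-- the returned list are unchanged while the counting pass becomes linear.


-- ===== PORT A =====
-- the defaultdict(int) of prefix counts built by A's nested loop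
def prefixosDict (lista_strings : List String) : PySem.Dict String Int :=
  lista_strings.foldl (fun prefixos string =>
    (PySem.List.pyRange 1 (PySem.Str.len string + 1) 1).foldl (fun prefixos i =>
      prefixos.modify (PySem.Str.slice string none (some i)) 0 (· + 1)) prefixos)
    PySem.Dict.empty

def maior_prefixo_comum (lista_strings : List String) : Option (List String) :=
  let prefixos := prefixosDict lista_strings
  if prefixos.size ≠ 0 then
    match PySem.List.max? prefixos.keys (fun p => prefixos.getD p 0) with
    | some prefixo_comum =>
        some (lista_strings.filter (fun s => PySem.Str.startswith s prefixo_comum))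
    | none => none
  else
    none

-- ===== PORT B =====
-- the dict of first-character (s[:1]) counts built by B's single conditional pass
def contagemDict (lista_strings : List String) : PySem.Dict String Int :=
  lista_strings.foldl (fun contagem s =>
    if PySem.Str.len s ≠ 0 then
      contagem.insert (PySem.Str.slice s none (some 1))
        (contagem.getD (PySem.Str.slice s none (some 1)) 0 + 1)
    else contagem) PySem.Dict.empty

def maior_prefixo_comum_alt (lista_strings : List String) : Option (List String) :=
  let contagem := contagemDict lista_strings
  if contagem.size = 0 then
    none
  else
    match PySem.List.max? contagem.keys (fun p => contagem.getD p 0) with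
    | some letra =>
        some (lista_strings.filter (fun s => PySem.Str.startswith s letra))
    | none => none

-- ===== PRECONDITION & SPEC =====
def Spec_maior_prefixo_comum (lista_strings : List String) (out : Option (List String)) : Prop := out = maior_prefixo_comum_alt lista_strings
instance (lista_strings : List String) (out : Option (List String)) : Decidable (Spec_maior_prefixo_comum lista_strings out) := by unfold Spec_maior_prefixo_comum; infer_instance

-- ===== CLAIM (what is proved, stated in full; the proofs are below) =====
def Claim_equal_maior_prefixo_comum : Prop := ∀ (lista_strings : List String), Dom_maior_prefixo_comum lista_strings → Spec_maior_prefixo_comum lista_strings (maior_prefixo_comum lista_strings)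

-- ===== LEMMAS AND PROOFS =====


lemma aux1 {α : Type} (v : α → Int) :
    ∀ (xs : List α) (a : α),
      xs.foldl (fun acc x => match acc with
        | none => some x
        | some m => if v m < v x then some x else some m) (some a)
      = some (xs.foldl (fun m y => if v m < v y then y else m) a) := by
  intro xs
  induction xs with
  | nil => intro a; rfl
  | cons b bs ih =>
    intro a
    rw [List.foldl_cons, List.foldl_cons]
    by_cases h : v a < v b
    · simp only [h, if_pos]
      exact ih b
    · simp only [h, ite_false]
      exact ih a

lemma aux0 {α : Type} (v : α → Int) :
    ∀ (bs : List α) (a : α), (∀ y ∈ bs, v y ≤ v a) →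
      bs.foldl (fun m y => if v m < v y then y else m) a = a := by
  intro bs
  induction bs with
  | nil => intro a _; rfl
  | cons y ys ih =>
    intro a hall
    rw [List.foldl_cons, if_neg (not_lt.mpr (hall y (by simp)))]
    exact ih a (fun z hz => hall z (by simp [hz]))

lemma aux2 {α : Type} (v : α → Int) :
    ∀ (xs : List α) (a : α),
      (a :: xs).find? (fun x => (a :: xs).all (fun y => decide (v y ≤ v x)))
      = some (xs.foldl (fun m y => if v m < v y then y else m) a) := by
  intro xs
  induction xs with
  | nil =>
    intro a
    simp [List.find?]
  | cons b bs ih =>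
    intro a
    rw [List.foldl_cons]
    by_cases h : v a < v b
    · -- g a b = b; the predicate collapses to the (b :: bs) one
      have hg : (if v a < v b then b else a) = b := if_pos h
      have hPP : (fun x => (a :: b :: bs).all (fun y => decide (v y ≤ v x)))
          = (fun x => (b :: bs).all (fun y => decide (v y ≤ v x))) := by
        funext x
        by_cases hbx : v b ≤ v x
        · have hax : v a ≤ v x := le_of_lt (lt_of_lt_of_le h hbx)
          simp [List.all_cons, hax, hbx]
        · simp [List.all_cons, hbx]
      rw [hg, hPP]
      rw [List.find?_cons]
      have hPa : ((b :: bs).all (fun y => decide (v y ≤ v a))) = false := by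
        simp [List.all_cons]
        intro hba
        exact absurd (lt_of_lt_of_le h hba) (lt_irrefl _)
      rw [hPa]
      exact ih b
    · have hba : v b ≤ v a := le_of_not_gt h
      have hg : (if v a < v b then b else a) = a := if_neg h
      have hPP : (fun x => (a :: b :: bs).all (fun y => decide (v y ≤ v x)))
          = (fun x => (a :: bs).all (fun y => decide (v y ≤ v x))) := by
        funext x
        by_cases hax : v a ≤ v x
        · have hbx : v b ≤ v x := le_trans hba hax
          simp [List.all_cons, hax, hbx]
        · simp [List.all_cons, hax]
      rw [hg, hPP]
      rw [List.find?_cons, List.find?_cons]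
      cases hPa : ((a :: bs).all fun y => decide (v y ≤ v a)) with
      | true =>
        have hall : ∀ y ∈ bs, v y ≤ v a := by
          intro y hy
          simpa using List.all_eq_true.mp hPa y (by simp [hy])
        rw [aux0 v bs a hall]
      | false =>
        have hPb : ((a :: bs).all fun y => decide (v y ≤ v b)) = false := by
          cases hPb : ((a :: bs).all fun y => decide (v y ≤ v b)) with
          | false => rfl
          | true =>
            exfalso
            have : ∀ y ∈ a :: bs, v y ≤ v b := by
              intro y hy
              have := List.all_eq_true.mp hPb y hy
              simpa using this
            have hPa' : ((a :: bs).all fun y => decide (v y ≤ v a)) = true := by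
              rw [List.all_eq_true]
              intro y hy
              simpa using le_trans (this y hy) hba
            rw [hPa'] at hPa
            exact Bool.noConfusion hPa
        rw [hPb]
        have := ih a
        rw [List.find?_cons, hPa] at this
        exact this

lemma max?_eq_find?_allmax {α : Type} (v : α → Int) (l : List α) :
    PySem.List.max? l v = l.find? (fun x => l.all (fun y => decide (v y ≤ v x))) := by
  cases l with
  | nil => rfl
  | cons a xs =>
    have h1 : PySem.List.max? (a :: xs) v
        = xs.foldl (fun acc x => match acc with
            | none => some x
            | some m => if v m < v x then some x else some m) (some a) := rfl
    rw [h1, aux1 v xs a, (aux2 v xs a).symm]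


lemma find?_foldl_add {α : Type} [BEq α] [LawfulBEq α] (Q : α → Bool) :
    ∀ (P : List α) (acc : List α),
      (P.foldl PySem.Set.add acc).find? Q
      = (match acc.find? Q with
         | some y => some y
         | none => P.find? (fun x => Q x && !acc.contains x)) := by
  intro P
  induction P with
  | nil =>
    intro acc
    cases h : acc.find? Q <;> simp [h]
  | cons x P' ih =>
    intro acc
    rw [List.foldl_cons]
    by_cases hm : x ∈ acc
    · have hc : acc.contains x = true := by simpa using hm
      have hadd : PySem.Set.add acc x = acc := by
        unfold PySem.Set.add PySem.Set.contains
        rw [if_pos hc]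
      rw [hadd, ih acc]
      cases h : acc.find? Q with
      | some y => rfl
      | none =>
        rw [List.find?_cons]
        have hp : (Q x && !acc.contains x) = false := by rw [hc]; simp
        rw [hp]
    · have hc : acc.contains x = false := by simpa using hm
      have hadd : PySem.Set.add acc x = acc ++ [x] := by
        unfold PySem.Set.add PySem.Set.contains
        rw [hc]
        simp
      rw [hadd, ih (acc ++ [x])]
      cases h : acc.find? Q with
      | some y =>
        have happ : (acc ++ [x]).find? Q = some y := by rw [List.find?_append, h]; rfl
        rw [happ]
      | none =>
        cases hQx : Q x with
        | true =>
          have happ : (acc ++ [x]).find? Q = some x := by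
            rw [List.find?_append, h]
            simp [hQx]
          rw [happ, List.find?_cons]
          have hp : (Q x && !acc.contains x) = true := by rw [hQx, hc]; rfl
          rw [hp]
        | false =>
          have happ : (acc ++ [x]).find? Q = none := by
            rw [List.find?_append, h]
            simp [hQx]
          rw [happ, List.find?_cons]
          have hp : (Q x && !acc.contains x) = false := by rw [hQx]; rfl
          rw [hp]
          have hfun : (fun z => Q z && !(acc ++ [x]).contains z)
              = (fun z => Q z && !acc.contains z) := by
            funext z
            cases hqz : Q z with
            | false => simp
            | true =>
              have hne : z ≠ x := by
                intro he
                rw [he, hQx] at hqz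
                exact Bool.noConfusion hqz
              simp [hne]
          rw [hfun]

lemma find?_dedup {α : Type} [BEq α] [LawfulBEq α] (Q : α → Bool) (l : List α) :
    (PySem.List.dedup l).find? Q = l.find? Q := by
  have h := find?_foldl_add Q l []
  rw [show PySem.List.dedup l = l.foldl PySem.Set.add [] from rfl, h]
  simp
def pvPref (s : String) : List String :=
  (PySem.List.pyRange 1 (PySem.Str.len s + 1) 1).map (fun i => PySem.Str.slice s none (some i))

def pvP (l : List String) : List String := l.flatMap pvPref

def pvC (l : List String) : List String :=
  l.filterMap (fun s => if PySem.Str.len s ≠ 0 then some (PySem.Str.slice s none (some 1)) else none)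

def pvLen1 (q : String) : Bool := q.toList.length == 1

lemma dictA_eq (l : List String) : prefixosDict l = PySem.Dict.counter (pvP l) := by
  unfold prefixosDict pvP
  rw [PySem.Dict.counter_eq_foldl, List.foldl_flatMap]
  have h : (fun (prefixos : PySem.Dict String Int) (string : String) =>
      (PySem.List.pyRange 1 (PySem.Str.len string + 1) 1).foldl (fun prefixos i =>
        prefixos.modify (PySem.Str.slice string none (some i)) 0 (· + 1)) prefixos)
      = (fun acc x => (pvPref x).foldl (fun d x => d.modify x 0 fun x => x + 1) acc) := by
    funext d s
    unfold pvPref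
    rw [List.foldl_map]
  rw [h]

lemma dictB_eq (l : List String) : contagemDict l = PySem.Dict.counter (pvC l) := by
  have key : ∀ (l : List String) (d : PySem.Dict String Int),
      l.foldl (fun contagem s =>
        if PySem.Str.len s ≠ 0 then
          contagem.insert (PySem.Str.slice s none (some 1))
            (contagem.getD (PySem.Str.slice s none (some 1)) 0 + 1)
        else contagem) d
      = (l.filterMap (fun s => if PySem.Str.len s ≠ 0 then some (PySem.Str.slice s none (some 1)) else none)).foldl
          (fun d x => d.insert x (d.getD x 0 + 1)) d := by
    intro l
    induction l with
    | nil => intro d; rfl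
    | cons a t ih =>
      intro d
      rw [List.foldl_cons, List.filterMap_cons]
      by_cases hc : PySem.Str.len a ≠ 0
      · rw [if_pos hc, if_pos hc, List.foldl_cons]
        exact ih _
      · rw [if_neg hc, if_neg hc]
        exact ih _
  unfold contagemDict pvC
  rw [key, PySem.Dict.foldl_insert_getD_add_one_eq_counter]

lemma pvPref_eq (s : String) : pvPref s
    = (List.range s.toList.length).map (fun (k : Nat) => PySem.Str.slice s none (some (1 + (k : Int)))) := by
  unfold pvPref
  rw [PySem.List.pyRange_one]
  have hb : (PySem.Str.len s + 1 - 1).toNat = s.toList.length := by simp [PySem.Str.len_eq]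
  rw [hb, List.map_map]
  rfl

lemma slice1k_toList (s : String) (k : Nat) :
    (PySem.Str.slice s none (some (1 + (k : Int)))).toList = s.toList.take (1 + k) := by
  have h1 : ((1:Int) + (k:Int)).toNat = 1 + k := by omega
  rw [PySem.Str.toList_slice, PySem.Chars.slice_eq_listSlice, PySem.List.slice_to _ (by omega), h1]

lemma slice1_toList (s : String) :
    (PySem.Str.slice s none (some 1)).toList = s.toList.take 1 := by
  have := slice1k_toList s 0
  simpa using this

def pvHead0 (s : String) : String := PySem.Str.slice s none (some 1)

lemma pvHead0_eq_slice0 (s : String) :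
    pvHead0 s = PySem.Str.slice s none (some (1 + ((0:Nat) : Int))) := by
  unfold pvHead0
  norm_num

lemma mem_pvPref {x s : String} :
    x ∈ pvPref s ↔ ∃ k, k < s.toList.length ∧ x = PySem.Str.slice s none (some (1 + (k : Int))) := by
  rw [pvPref_eq]
  simp [List.mem_map, List.mem_range, eq_comm]

lemma toList_of_mem_pvPref {x s : String} (h : x ∈ pvPref s) :
    ∃ k, k < s.toList.length ∧ x.toList = s.toList.take (1 + k) := by
  obtain ⟨k, hk, rfl⟩ := mem_pvPref.mp h
  exact ⟨k, hk, slice1k_toList s k⟩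

lemma toList_ne_nil_of_mem_pvPref {x s : String} (h : x ∈ pvPref s) : x.toList ≠ [] := by
  obtain ⟨k, hk, ht⟩ := toList_of_mem_pvPref h
  rw [ht]
  intro hnil
  have h2 : (List.take (1 + k) s.toList).length = 0 := by rw [hnil]; rfl
  rw [List.length_take] at h2
  omega

lemma pvHead0_of_mem_pvPref {x s : String} (h : x ∈ pvPref s) : pvHead0 x = pvHead0 s := by
  obtain ⟨k, hk, ht⟩ := toList_of_mem_pvPref h
  apply String.ext
  unfold pvHead0
  rw [slice1_toList, slice1_toList, ht, List.take_take]
  congr 1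
  omega

lemma pvHead0_mem_pvPref {s : String} (h : s.toList.length ≠ 0) : pvHead0 s ∈ pvPref s := by
  rw [mem_pvPref]
  exact ⟨0, by omega, pvHead0_eq_slice0 s⟩

lemma pvLen1_pvHead0 {x : String} (h : x.toList ≠ []) : pvLen1 (pvHead0 x) = true := by
  unfold pvLen1 pvHead0
  rw [slice1_toList]
  have hl : 0 < x.toList.length := List.length_pos_iff.mpr h
  have h2 : (List.take 1 x.toList).length = 1 := by
    rw [List.length_take]
    omega
  rw [h2]
  rfl

lemma nodup_pvPref (s : String) : (pvPref s).Nodup := by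
  rw [pvPref_eq]
  apply List.Nodup.map_on _ (List.nodup_range)
  intro k hk j hj he
  have hk' := List.mem_range.mp hk
  have hj' := List.mem_range.mp hj
  have := congrArg (fun q => q.toList.length) he
  simp only [slice1k_toList, List.length_take] at this
  omega

lemma count_le_one_pvPref (s : String) (q : String) : (pvPref s).count q ≤ 1 :=
  List.nodup_iff_count_le_one.mp (nodup_pvPref s) q

lemma count_pvHead0_ge {s x : String} : (pvPref s).count x ≤ (pvPref s).count (pvHead0 x) := by
  by_cases hm : x ∈ pvPref s
  · have h1 : (pvPref s).count x ≤ 1 := count_le_one_pvPref s x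
    have hne : s.toList.length ≠ 0 := by
      intro h0
      have : pvPref s = [] := by rw [pvPref_eq, h0]; rfl
      rw [this] at hm
      exact absurd hm (List.not_mem_nil)
    have hmem : pvHead0 x ∈ pvPref s := by
      rw [pvHead0_of_mem_pvPref hm]
      exact pvHead0_mem_pvPref hne
    have := List.count_pos_iff.mpr hmem
    omega
  · rw [List.count_eq_zero_of_not_mem hm]
    exact Nat.zero_le _

lemma count_pvP_mono (l : List String) (x : String) :
    (pvP l).count x ≤ (pvP l).count (pvHead0 x) := by
  unfold pvP
  rw [List.count_flatMap, List.count_flatMap]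
  exact List.sum_le_sum (fun s _ => count_pvHead0_ge)

lemma pvHead0_mem_pvP {l : List String} {x : String} (h : x ∈ pvP l) : pvHead0 x ∈ pvP l := by
  obtain ⟨s, hs, hx⟩ := List.mem_flatMap.mp h
  apply List.mem_flatMap.mpr
  refine ⟨s, hs, ?_⟩
  rw [pvHead0_of_mem_pvPref hx]
  apply pvHead0_mem_pvPref
  intro h0
  have : pvPref s = [] := by rw [pvPref_eq, h0]; rfl
  rw [this] at hx
  exact absurd hx (List.not_mem_nil)

lemma toList_ne_nil_of_mem_pvP {l : List String} {x : String} (h : x ∈ pvP l) : x.toList ≠ [] := by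
  obtain ⟨s, _, hx⟩ := List.mem_flatMap.mp h
  exact toList_ne_nil_of_mem_pvPref hx

lemma pvLen1_at (s : String) (k : Nat) (hk : k < s.toList.length) :
    pvLen1 (PySem.Str.slice s none (some (1 + (k : Int)))) = (k == 0) := by
  unfold pvLen1
  rw [slice1k_toList, List.length_take]
  cases k with
  | zero =>
    have h1 : min (1 + 0) s.toList.length = 1 := by omega
    rw [h1]
    rfl
  | succ m =>
    have h1 : min (1 + (m + 1)) s.toList.length = m + 2 := by omega
    rw [h1]
    simp

lemma head_pvPref {s y : String} {r : List String} (h : pvPref s = y :: r) :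
    y = pvHead0 s ∧ pvLen1 y = true := by
  rw [pvPref_eq] at h
  cases hn : s.toList.length with
  | zero =>
    rw [hn] at h
    simp at h
  | succ n =>
    rw [hn, List.range_succ_eq_map, List.map_cons] at h
    have hy : y = PySem.Str.slice s none (some (1 + ((0:Nat) : Int))) := (List.cons.injEq _ _ _ _ |>.mp h).1.symm
    have hy' : y = pvHead0 s := by rw [hy, ← pvHead0_eq_slice0]
    refine ⟨hy', ?_⟩
    rw [hy]
    rw [pvLen1_at s 0 (by omega)]
    rfl

lemma pvPref_nil_of_len_zero {s : String} (h : s.toList.length = 0) : pvPref s = [] := by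
  rw [pvPref_eq, h]
  rfl

lemma first_elt : ∀ (l : List String) (x : String) (bs : List String),
    pvP l = x :: bs → pvLen1 x = true := by
  intro l
  induction l with
  | nil => intro x bs h; simp [pvP] at h
  | cons s t ih =>
    intro x bs h
    rw [show pvP (s :: t) = pvPref s ++ pvP t from rfl] at h
    cases hp : pvPref s with
    | nil =>
      rw [hp, List.nil_append] at h
      exact ih x bs h
    | cons y r =>
      rw [hp, List.cons_append] at h
      have hx : y = x := (List.cons.injEq _ _ _ _ |>.mp h).1
      have := (head_pvPref hp).2
      rw [hx] at this
      exact this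

lemma blockhead : ∀ (l : List String) (as : List String) (x : String) (bs : List String),
    pvP l = as ++ x :: bs → pvLen1 x = false → pvHead0 x ∈ as := by
  intro l
  induction l with
  | nil => intro as x bs h _; simp [pvP, eq_comm, List.append_eq_nil_iff] at h
  | cons s t ih =>
    intro as x bs h hx
    rw [show pvP (s :: t) = pvPref s ++ pvP t from rfl] at h
    rcases List.append_eq_append_iff.mp h with ⟨a', hc, hb⟩ | ⟨c', ha, hd⟩
    · have := ih a' x bs hb hx
      rw [hc]
      exact List.mem_append_right _ this
    · cases c' with
      | nil =>
        rw [List.nil_append] at hd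
        have := first_elt t x bs hd.symm
        rw [this] at hx
        exact Bool.noConfusion hx
      | cons z c'' =>
        have hz : x = z := (List.cons.injEq _ _ _ _ |>.mp hd).1
        rw [← hz] at ha
        cases as with
        | nil =>
          rw [List.nil_append] at ha
          have := (head_pvPref ha).2
          rw [this] at hx
          exact Bool.noConfusion hx
        | cons a₀ as' =>
          rw [List.cons_append] at ha
          have ha₀ : a₀ = pvHead0 s := (head_pvPref ha).1
          have hxm : x ∈ pvPref s := by
            rw [ha]
            exact List.mem_cons_of_mem _ (List.mem_append_right _ (List.mem_cons_self))
          have : pvHead0 x = pvHead0 s := pvHead0_of_mem_pvPref hxm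
          rw [this, ← ha₀]
          exact List.mem_cons_self

lemma filter_len1_pvPref (s : String) :
    (pvPref s).filter pvLen1
      = if PySem.Str.len s ≠ 0 then [PySem.Str.slice s none (some 1)] else [] := by
  cases hn : s.toList.length with
  | zero =>
    rw [pvPref_nil_of_len_zero hn]
    have : ¬ (PySem.Str.len s ≠ 0) := by simp [PySem.Str.len_eq, hn]
    rw [if_neg this]
    rfl
  | succ n =>
    have hpos : PySem.Str.len s ≠ 0 := by
      rw [PySem.Str.len_eq, hn]
      push_cast
      omega
    rw [if_pos hpos, pvPref_eq, hn, List.range_succ_eq_map, List.map_cons, List.filter_cons]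
    have h0 : pvLen1 (PySem.Str.slice s none (some (1 + ((0:Nat) : Int)))) = true := by
      rw [pvLen1_at s 0 (by omega)]
      rfl
    rw [h0, List.map_map, List.filter_map]
    have hnil : (List.range n).filter (pvLen1 ∘ (fun (k : Nat) => PySem.Str.slice s none (some (1 + (k : Int)))) ∘ Nat.succ) = [] := by
      rw [List.filter_eq_nil_iff]
      intro k hk
      have hk' := List.mem_range.mp hk
      simp only [Function.comp]
      rw [show ((Nat.succ k : Nat) : Int) = ((k + 1 : Nat) : Int) from rfl]
      rw [pvLen1_at s (k+1) (by omega)]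
      simp
    rw [hnil, List.map_nil]
    have : PySem.Str.slice s none (some (1 + ((0:Nat) : Int))) = PySem.Str.slice s none (some 1) := by
      rw [← pvHead0_eq_slice0]
      rfl
    rw [this]
    rfl

lemma pvC_eq_filter (l : List String) : pvC l = (pvP l).filter pvLen1 := by
  unfold pvC pvP
  induction l with
  | nil => rfl
  | cons s t ih =>
    rw [List.filterMap_cons, List.flatMap_cons, List.filter_append, filter_len1_pvPref, ← ih]
    by_cases hc : PySem.Str.len s ≠ 0
    · rw [if_pos hc, if_pos hc]
      rfl
    · rw [if_neg hc, if_neg hc]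
      rfl

lemma find?_congr_mem {α : Type} {f g : α → Bool} (l : List α) (h : ∀ x ∈ l, f x = g x) :
    l.find? f = l.find? g := by
  induction l with
  | nil => rfl
  | cons a t ih =>
    have ha := h a (by simp)
    rw [List.find?_cons, List.find?_cons, ha]
    cases g a
    · exact ih (fun x hx => h x (by simp [hx]))
    · rfl

lemma find?_filter {α : Type} (p Q : α → Bool) (l : List α) :
    (l.filter p).find? Q = l.find? (fun x => p x && Q x) := by
  induction l with
  | nil => rfl
  | cons a t ih =>
    by_cases hp : p a
    · simp only [List.filter_cons, hp, if_pos, List.find?_cons, Bool.true_and]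
      cases Q a <;> simp [ih]
    · simp only [List.filter_cons, List.find?_cons]
      simp [hp, ih]

-- the common argmax of a counter dict built from the list X
lemma max?_counter (X : List String) :
    PySem.List.max? (PySem.Dict.counter X).keys (fun p => (PySem.Dict.counter X).getD p 0)
      = X.find? (fun x => X.all (fun y => decide ((X.count y : Int) ≤ (X.count x : Int)))) := by
  rw [PySem.Dict.keys_counter, ← PySem.List.dedup_eq_ofList]
  have hv : (fun p => (PySem.Dict.counter X).getD p 0) = (fun p => ((X.count p : Nat) : Int)) := by
    funext p
    exact PySem.Dict.getD_counter X p
  rw [hv, max?_eq_find?_allmax]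
  have hall : (fun x => (PySem.List.dedup X).all (fun y => decide ((X.count y : Int) ≤ (X.count x : Int))))
      = (fun x => X.all (fun y => decide ((X.count y : Int) ≤ (X.count x : Int)))) := by
    funext x
    rw [Bool.eq_iff_iff]
    simp only [List.all_eq_true, PySem.List.mem_dedup]
  rw [hall, find?_dedup]

lemma size_counter_ne_zero {X : List String} (h : X ≠ []) : (PySem.Dict.counter X).size ≠ 0 := by
  have hk : (PySem.Dict.counter X).keys = PySem.Set.ofList X := PySem.Dict.keys_counter X
  obtain ⟨x, hx⟩ := List.exists_mem_of_ne_nil X h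
  have hxk : x ∈ (PySem.Dict.counter X).keys := by
    rw [hk, ← PySem.List.dedup_eq_ofList]
    exact (PySem.List.mem_dedup X x).mpr hx
  intro h0
  have : (PySem.Dict.counter X).keys = [] := by
    have : (PySem.Dict.counter X).keys.length = 0 := by
      simpa [PySem.Dict.keys, PySem.Dict.size] using h0
    exact List.length_eq_zero_iff.mp this
  rw [this] at hxk
  exact absurd hxk (List.not_mem_nil)

-- the two find?s agree: B's filtered search finds exactly A's winner
lemma find?_core (l : List String) :
    (pvP l).find? (fun x => (pvP l).all (fun y => decide (((pvP l).count y : Int) ≤ ((pvP l).count x : Int))))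
      = ((pvP l).filter pvLen1).find? (fun x => ((pvP l).filter pvLen1).all
          (fun y => decide ((((pvP l).filter pvLen1).count y : Int) ≤ (((pvP l).filter pvLen1).count x : Int)))) := by
  have hWV : ∀ q, pvLen1 q = true → ((pvP l).filter pvLen1).count q = (pvP l).count q := by
    intro q hq
    exact List.count_filter hq
  have hmono : ∀ y : String, ((pvP l).count y : Int) ≤ ((pvP l).count (pvHead0 y) : Int) := by
    intro y
    exact_mod_cast count_pvP_mono l y
  -- step 1: search the filtered list = search pvP with the length-1 test added
  rw [find?_filter]
  -- step 2: on members of pvP the added-test predicates agree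
  rw [find?_congr_mem (pvP l) (f := fun x => pvLen1 x && ((pvP l).filter pvLen1).all
        (fun y => decide ((((pvP l).filter pvLen1).count y : Int) ≤ (((pvP l).filter pvLen1).count x : Int))))
      (g := fun x => pvLen1 x && (pvP l).all (fun y => decide (((pvP l).count y : Int) ≤ ((pvP l).count x : Int))))
      (by
        intro x hx
        simp only
        cases hl1 : pvLen1 x with
        | false => rfl
        | true =>
          rw [Bool.true_and, Bool.true_and, Bool.eq_iff_iff, List.all_eq_true, List.all_eq_true]
          constructor
          · intro hB y hy
            have h1 : ((pvP l).count y : Int) ≤ ((pvP l).count (pvHead0 y) : Int) := hmono y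
            have hyne : y.toList ≠ [] := toList_ne_nil_of_mem_pvP hy
            have hyl1 : pvLen1 (pvHead0 y) = true := pvLen1_pvHead0 hyne
            have hymem : pvHead0 y ∈ (pvP l).filter pvLen1 :=
              List.mem_filter.mpr ⟨pvHead0_mem_pvP hy, hyl1⟩
            have h2 := hB (pvHead0 y) hymem
            rw [decide_eq_true_eq] at h2 ⊢
            rw [hWV _ hyl1, hWV _ hl1] at h2
            exact le_trans h1 h2
          · intro hA y hy
            have hym := List.mem_filter.mp hy
            have h2 := hA y hym.1
            rw [decide_eq_true_eq] at h2 ⊢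
            rw [hWV _ hym.2, hWV _ hl1]
            exact h2)]
  -- step 3: A's winner already passes the length-1 test (blockhead argument)
  cases hfa : (pvP l).find? (fun x => (pvP l).all (fun y => decide (((pvP l).count y : Int) ≤ ((pvP l).count x : Int)))) with
  | none =>
    rw [List.find?_eq_none] at hfa
    symm
    rw [List.find?_eq_none]
    intro x hx
    have := hfa x hx
    simp only [Bool.and_eq_true, not_and] at this ⊢
    intro _ h2
    exact this h2
  | some m =>
    obtain ⟨hQm, as, bs, hsplit, hnot⟩ := List.find?_eq_some_iff_append.mp hfa
    have hm1 : pvLen1 m = true := by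
      cases hm : pvLen1 m with
      | true => rfl
      | false =>
        exfalso
        have hh : pvHead0 m ∈ as := blockhead l as m bs hsplit hm
        have hQh : ((pvP l).all (fun y => decide (((pvP l).count y : Int) ≤ ((pvP l).count (pvHead0 m) : Int)))) = true := by
          rw [List.all_eq_true]
          intro y hy
          have h1 := List.all_eq_true.mp hQm y hy
          rw [decide_eq_true_eq] at h1 ⊢
          exact le_trans h1 (hmono m)
        have := hnot (pvHead0 m) hh
        rw [hQh] at this
        exact Bool.noConfusion this
    symm
    rw [List.find?_eq_some_iff_append]
    refine ⟨?_, as, bs, hsplit, ?_⟩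
    · simp only [hm1, Bool.true_and]
      exact hQm
    · intro a ha
      have := hnot a ha
      simp only [Bool.not_eq_eq_eq_not, Bool.not_true, Bool.and_eq_false_imp] at this ⊢
      intro _
      simpa using this

-- ===== VERDICT (by name: the statement is the Claim_ definition above) =====
theorem maior_prefixo_comum_spec : Claim_equal_maior_prefixo_comum := by
  intro l _
  unfold Spec_maior_prefixo_comum
  show maior_prefixo_comum l = maior_prefixo_comum_alt l
  unfold maior_prefixo_comum maior_prefixo_comum_alt
  rw [dictA_eq, dictB_eq, pvC_eq_filter]
  by_cases hP : pvP l = []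
  · rw [hP]
    rfl
  · have hC : (pvP l).filter pvLen1 ≠ [] := by
      obtain ⟨x, hx⟩ := List.exists_mem_of_ne_nil _ hP
      have h1 : pvHead0 x ∈ pvP l := pvHead0_mem_pvP hx
      have h2 : pvLen1 (pvHead0 x) = true := pvLen1_pvHead0 (toList_ne_nil_of_mem_pvP hx)
      intro hnil
      have : pvHead0 x ∈ (pvP l).filter pvLen1 := List.mem_filter.mpr ⟨h1, h2⟩
      rw [hnil] at this
      exact absurd this (List.not_mem_nil)
    rw [if_pos (size_counter_ne_zero hP), if_neg (fun h => size_counter_ne_zero hC h)]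
    have hmax := (max?_counter (pvP l)).trans ((find?_core l).trans (max?_counter ((pvP l).filter pvLen1)).symm)
    rw [hmax]
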